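-- pv_equiv track=rewrite | github.com/LEEMINJOO/Algorithm | Baekjoon/2042 sum of section.py | make_sum_tree
-- ===== SOURCE A (Python) =====
-- def make_sum_tree(lst, depth):
-- 	tree = [0 for _ in range(2**depth)]
-- 	tree += lst
-- 	pos = (len(tree)-1)//2
-- 	if len(tree)%2 == 1 :
-- 		tree.append(0)
-- 	for i in reversed(range(1,pos+1)):
-- 		tree[i] = tree[i*2]+tree[i*2+1]
-- 	return tree
-- ===== SOURCE B (Python) =====
-- def make_sum_tree(lst, depth):
--     tree = [0 for _ in range(2**depth)]
--     tree += lst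
--     if len(tree) % 2 == 1:
--         tree.append(0)
--
--     def build(i):
--         if 2 * i >= len(tree):
--             return tree[i]
--         tree[i] = build(2 * i) + build(2 * i + 1)
--         return tree[i]
--
--     build(1)
--     return tree
-- ===== Notes on version B (the rewrite author's own statement) =====
-- stated objective: alternative
-- what changed: Replaces A's reversed bottom-up for-loop over internal indices with a top-down recursion from the root that computes each parent from its two recursively built children.
import Mathlib
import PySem

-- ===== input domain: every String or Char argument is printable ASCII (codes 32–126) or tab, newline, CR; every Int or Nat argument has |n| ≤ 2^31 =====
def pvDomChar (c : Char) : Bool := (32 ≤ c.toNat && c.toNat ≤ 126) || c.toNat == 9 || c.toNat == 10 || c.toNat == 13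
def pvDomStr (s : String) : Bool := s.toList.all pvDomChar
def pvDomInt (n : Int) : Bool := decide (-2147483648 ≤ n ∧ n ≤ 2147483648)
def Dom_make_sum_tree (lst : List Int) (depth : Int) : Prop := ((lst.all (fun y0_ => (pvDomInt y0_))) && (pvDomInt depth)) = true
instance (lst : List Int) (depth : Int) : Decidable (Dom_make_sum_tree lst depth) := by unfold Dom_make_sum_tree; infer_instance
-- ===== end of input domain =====

-- B replaces A's reversed bottom-up loop over internal nodes by a top-down recursion
-- from the root that computes each parent from its recursively built children
-- (alternative decomposition, same cost).


-- ===== PORT A =====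
-- Transliteration of A. With Pre_ (depth ≥ 0) the length is ≥ 1, so
-- pos = (len-1)//2 is the Nat computation (len-1)/2, and every index i of
-- reversed(range(1,pos+1)) and the read indices 2i, 2i+1 are in range, so the
-- Nat-indexed set/getD are exact.
def make_sum_tree (lst : List Int) (depth : Int) : List Int :=
  let tree := List.replicate (2 ^ depth.toNat) (0 : Int) ++ lst
  let pos : Nat := (tree.length - 1) / 2
  let tree := if tree.length % 2 = 1 then tree ++ [0] else tree
  (List.range' 1 pos).reverse.foldl
    (fun t i => t.set i (t.getD (i * 2) 0 + t.getD (i * 2 + 1) 0)) tree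

-- ===== PORT B =====
-- Transliteration of B's recursive `build`: the i = 0 branch is a totality
-- guard only (B invokes build at the root, index 1, and recursive calls keep
-- i ≥ 1); at the leaf test the read index i is in range on every actual call.
def buildAux (L : Nat) (i : Nat) (t : List Int) : List Int × Int :=
  if i = 0 then (t, 0)
  else if L ≤ 2 * i then (t, t.getD i 0)
  else
    let p := buildAux L (2 * i) t
    let q := buildAux L (2 * i + 1) p.1
    (q.1.set i (p.2 + q.2), p.2 + q.2)
termination_by L - i
decreasing_by all_goals omega

def make_sum_tree_alt (lst : List Int) (depth : Int) : List Int :=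
  let tree := List.replicate (2 ^ depth.toNat) (0 : Int) ++ lst
  let tree := if tree.length % 2 = 1 then tree ++ [0] else tree
  (buildAux tree.length 1 tree).1

-- ===== PRECONDITION & SPEC =====
-- Pre_: Python A raises TypeError when depth < 0 (2**depth is a float there).
def Pre_make_sum_tree (lst : List Int) (depth : Int) : Prop := 0 ≤ depth
instance (lst : List Int) (depth : Int) : Decidable (Pre_make_sum_tree lst depth) := by unfold Pre_make_sum_tree; infer_instance
def pvWitness_make_sum_tree : List Int × Int := ([1, 2, 3], 2)

def Spec_make_sum_tree (lst : List Int) (depth : Int) (out : List Int) : Prop := out = make_sum_tree_alt lst depth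
instance (lst : List Int) (depth : Int) (out : List Int) : Decidable (Spec_make_sum_tree lst depth out) := by unfold Spec_make_sum_tree; infer_instance

-- ===== CLAIM (what is proved, stated in full; the proofs are below) =====
def Claim_equal_make_sum_tree : Prop := ∀ (lst : List Int) (depth : Int), Dom_make_sum_tree lst depth → Pre_make_sum_tree lst depth → Spec_make_sum_tree lst depth (make_sum_tree lst depth)

-- ===== LEMMAS AND PROOFS =====

-- the intended value of node i in the finished tree of length L over initial tree t0
def fval (t0 : List Int) (L : Nat) (i : Nat) : Int :=
  if i = 0 then 0
  else if L ≤ 2 * i then t0.getD i 0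
  else fval t0 L (2 * i) + fval t0 L (2 * i + 1)
termination_by L - i
decreasing_by all_goals omega

lemma fval_leaf (t0 : List Int) (L i : Nat) (h1 : 1 ≤ i) (h2 : L ≤ 2 * i) :
    fval t0 L i = t0.getD i 0 := by
  rw [fval]; simp [show ¬ i = 0 by omega, h2]

lemma fval_internal (t0 : List Int) (L i : Nat) (h1 : 1 ≤ i) (h2 : 2 * i < L) :
    fval t0 L i = fval t0 L (2 * i) + fval t0 L (2 * i + 1) := by
  rw [fval]; have : ¬ i = 0 := by omega
  simp [this, Nat.not_le.mpr h2]

-- membership of j in the heap subtree rooted at i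
def InS (i j : Nat) : Prop := ∃ k, j / 2 ^ k = i

lemma InS_refl (i : Nat) : InS i i := ⟨0, by simp⟩

lemma InS_le {i j : Nat} (h : InS i j) : i ≤ j := by
  obtain ⟨k, hk⟩ := h; calc i = j / 2 ^ k := hk.symm
    _ ≤ j := Nat.div_le_self _ _

lemma InS_left {i j : Nat} (h : InS (2 * i) j) : InS i j := by
  obtain ⟨k, hk⟩ := h
  exact ⟨k + 1, by rw [pow_succ, ← Nat.div_div_eq_div_mul, hk]; omega⟩

lemma InS_right {i j : Nat} (h : InS (2 * i + 1) j) : InS i j := by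
  obtain ⟨k, hk⟩ := h
  exact ⟨k + 1, by rw [pow_succ, ← Nat.div_div_eq_div_mul, hk]; omega⟩

lemma InS_cases {i j : Nat} (h : InS i j) (hne : j ≠ i) :
    InS (2 * i) j ∨ InS (2 * i + 1) j := by
  obtain ⟨k, hk⟩ := h
  cases k with
  | zero => simp at hk; exact absurd hk hne
  | succ k' =>
    rw [pow_succ, ← Nat.div_div_eq_div_mul] at hk
    have : j / 2 ^ k' = 2 * i ∨ j / 2 ^ k' = 2 * i + 1 := by omega
    rcases this with h | h
    · exact Or.inl ⟨k', h⟩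
    · exact Or.inr ⟨k', h⟩

lemma InS_one {j : Nat} (h : 1 ≤ j) : InS 1 j := by
  refine ⟨Nat.log2 j, ?_⟩
  have h1 : 2 ^ Nat.log2 j ≤ j := Nat.log2_self_le (by omega)
  have h2 : j < 2 ^ (Nat.log2 j + 1) := Nat.lt_log2_self
  rw [pow_succ] at h2
  have hp : 0 < 2 ^ Nat.log2 j := Nat.two_pow_pos _
  refine Nat.div_eq_of_lt_le (by simpa using h1) (by omega)

lemma getD_set_self (l : List Int) (i : Nat) (v : Int) (h : i < l.length) :
    (l.set i v).getD i 0 = v := by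
  simp [List.getD, h]

lemma getD_set_ne (l : List Int) (i j : Nat) (v : Int) (h : i ≠ j) :
    (l.set i v).getD j 0 = l.getD j 0 := by
  simp [List.getD, List.getElem?_set_ne h]

-- correctness of B's recursion
lemma build_correct (t0 : List Int) (L : Nat) :
    ∀ n i t, L - i ≤ n → 1 ≤ i → t.length = L →
    (∀ j, L ≤ 2 * j → t.getD j 0 = t0.getD j 0) →
    (buildAux L i t).1.length = L ∧
    (buildAux L i t).2 = fval t0 L i ∧
    (∀ j, InS i j → 2 * j < L → (buildAux L i t).1.getD j 0 = fval t0 L j) ∧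
    (∀ j, ¬ (InS i j ∧ 2 * j < L) → (buildAux L i t).1.getD j 0 = t.getD j 0) := by
  intro n
  induction n with
  | zero =>
    intro i t hn h1 ht hleaf
    have hle : L ≤ 2 * i := by omega
    rw [buildAux, if_neg (show ¬ i = 0 by omega), if_pos hle]
    refine ⟨ht, ?_, ?_, fun j _ => rfl⟩
    · rw [fval_leaf t0 L i h1 hle]; exact hleaf i hle
    · intro j hIn hj; have := InS_le hIn; omega
  | succ n ih =>
    intro i t hn h1 ht hleaf
    by_cases hle : L ≤ 2 * i
    · rw [buildAux, if_neg (show ¬ i = 0 by omega), if_pos hle]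
      refine ⟨ht, ?_, ?_, fun j _ => rfl⟩
      · rw [fval_leaf t0 L i h1 hle]; exact hleaf i hle
      · intro j hIn hj; have := InS_le hIn; omega
    · have hlt : 2 * i < L := by omega
      obtain ⟨hlen1, hval1, hset1, hunset1⟩ :=
        ih (2 * i) t (by omega) (by omega) ht hleaf
      have hleaf1 : ∀ j, L ≤ 2 * j → (buildAux L (2 * i) t).1.getD j 0 = t0.getD j 0 := by
        intro j hj
        rw [hunset1 j (by intro h; omega)]; exact hleaf j hj
      obtain ⟨hlen2, hval2, hset2, hunset2⟩ :=
        ih (2 * i + 1) (buildAux L (2 * i) t).1 (by omega) (by omega) hlen1 hleaf1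
      rw [buildAux, if_neg (show ¬ i = 0 by omega), if_neg hle]
      simp only
      have hiL : i < L := by omega
      refine ⟨by simpa [List.length_set] using hlen2, ?_, ?_, ?_⟩
      · rw [fval_internal t0 L i h1 hlt, hval1, hval2]
      · intro j hIn hj
        by_cases hji : j = i
        · subst hji
          rw [getD_set_self _ _ _ (by omega : j < _ )]
          · rw [fval_internal t0 L j h1 hlt, hval1, hval2]
        · rw [getD_set_ne _ _ _ _ (Ne.symm hji)]
          by_cases hR : InS (2 * i + 1) j
          · exact hset2 j hR hj
          · rw [hunset2 j (by tauto)]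
            rcases InS_cases hIn hji with hL | hR'
            · exact hset1 j hL hj
            · exact absurd hR' hR
      · intro j hnot
        have hji : j ≠ i := by
          intro h; subst h; exact hnot ⟨InS_refl j, by omega⟩
        rw [getD_set_ne _ _ _ _ (Ne.symm hji)]
        have hnR : ¬ (InS (2 * i + 1) j ∧ 2 * j < L) :=
          fun h => hnot ⟨InS_right h.1, h.2⟩
        have hnL : ¬ (InS (2 * i) j ∧ 2 * j < L) :=
          fun h => hnot ⟨InS_left h.1, h.2⟩
        rw [hunset2 j hnR, hunset1 j hnL]

-- correctness of A's loop
lemma loopA_correct (t0 : List Int) (L pos : Nat) (hpos : 2 * pos < L)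
    (hpos2 : L ≤ 2 * pos + 2) :
    ∀ k t, k ≤ pos → t.length = L →
    (∀ j, t.getD j 0 = if 1 ≤ j ∧ j ≤ pos ∧ k < j then fval t0 L j else t0.getD j 0) →
    ((List.range' 1 k).reverse.foldl
        (fun (t : List Int) (i : Nat) => t.set i (t.getD (i * 2) 0 + t.getD (i * 2 + 1) 0)) t).length = L ∧
    (∀ j, ((List.range' 1 k).reverse.foldl
        (fun (t : List Int) (i : Nat) => t.set i (t.getD (i * 2) 0 + t.getD (i * 2 + 1) 0)) t).getD j 0 =
      if 1 ≤ j ∧ j ≤ pos then fval t0 L j else t0.getD j 0) := by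
  intro k
  induction k with
  | zero =>
    intro t hk ht hinv
    refine ⟨ht, fun j => ?_⟩
    have h := hinv j
    by_cases hc : 1 ≤ j ∧ j ≤ pos
    · rw [if_pos hc]; rw [if_pos ⟨hc.1, hc.2, by omega⟩] at h; exact h
    · rw [if_neg hc]; rw [if_neg (by tauto)] at h; exact h
  | succ k ih =>
    intro t hk ht hinv
    have hrange : (List.range' 1 (k + 1)).reverse
        = (k + 1) :: (List.range' 1 k).reverse := by
      rw [List.range'_concat]; simp [Nat.add_comm 1 k]
    rw [hrange, List.foldl_cons]
    have hkL : k + 1 < L := by omega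
    have hchild : ∀ m, k + 1 < m →
        t.getD m 0 = if m ≤ pos then fval t0 L m else t0.getD m 0 := by
      intro m hm
      have h := hinv m
      by_cases hc : m ≤ pos
      · rw [if_pos ⟨by omega, hc, by omega⟩] at h; rw [if_pos hc]; exact h
      · rw [if_neg (by tauto)] at h; rw [if_neg hc]; exact h
    have hgetc : ∀ m, k + 1 < m → t.getD m 0 = fval t0 L m := by
      intro m hm
      rw [hchild m hm]
      by_cases hc : m ≤ pos
      · rw [if_pos hc]
      · rw [if_neg hc, fval_leaf t0 L m (by omega) (by omega)]
    refine ih _ (by omega) (by simp [ht]) ?_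
    intro j
    by_cases hji : j = k + 1
    · rw [hji, getD_set_self _ _ _ (by omega)]
      rw [if_pos ⟨by omega, by omega, by omega⟩]
      rw [hgetc ((k + 1) * 2) (by omega), hgetc ((k + 1) * 2 + 1) (by omega)]
      rw [fval_internal t0 L (k + 1) (by omega) (by omega)]
      congr 2 <;> ring
    · rw [getD_set_ne _ _ _ _ (Ne.symm hji)]
      have h := hinv j
      by_cases hc : 1 ≤ j ∧ j ≤ pos ∧ k < j
      · rw [if_pos hc]; rw [if_pos ⟨hc.1, hc.2.1, by omega⟩] at h; exact h
      · rw [if_neg hc]; rw [if_neg (by intro hc2; exact hc ⟨hc2.1, hc2.2.1, by omega⟩)] at h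
        exact h

-- ===== VERDICT (by name: the statement is the Claim_ definition above) =====
theorem make_sum_tree_spec : Claim_equal_make_sum_tree := by
  intro lst depth hdom hpre
  unfold Spec_make_sum_tree make_sum_tree make_sum_tree_alt
  simp only
  set t1 := List.replicate (2 ^ depth.toNat) (0 : Int) ++ lst with ht1
  set pos := (t1.length - 1) / 2 with hposdef
  set t0 := if t1.length % 2 = 1 then t1 ++ [0] else t1 with ht0
  have h1 : 1 ≤ t1.length := by
    rw [ht1]; simp; exact Nat.le_add_right_of_le (Nat.one_le_two_pow)
  have hL0 : t0.length = if t1.length % 2 = 1 then t1.length + 1 else t1.length := by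
    rw [ht0]; split <;> simp
  have hp1 : 2 * pos < t0.length := by rw [hL0]; split <;> omega
  have hp2 : t0.length ≤ 2 * pos + 2 := by rw [hL0]; split <;> omega
  obtain ⟨hAlen, hAget⟩ :=
    loopA_correct t0 t0.length pos hp1 hp2 pos t0 le_rfl rfl
      (fun j => by rw [if_neg (by omega)])
  obtain ⟨hBlen, _, hBset, hBunset⟩ :=
    build_correct t0 t0.length t0.length 1 t0 (by omega) le_rfl rfl (fun j _ => rfl)
  apply List.ext_getElem (by rw [hAlen, hBlen])
  intro j hj1 hj2
  rw [← List.getD_eq_getElem _ 0 hj1, ← List.getD_eq_getElem _ 0 hj2]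
  rw [hAget j]
  by_cases hc : 1 ≤ j ∧ 2 * j < t0.length
  · rw [hBset j (InS_one hc.1) hc.2, if_pos ⟨hc.1, by omega⟩]
  · rw [hBunset j (by intro h; exact hc ⟨InS_le h.1, h.2⟩)]
    rw [if_neg (by intro h; exact hc ⟨h.1, by omega⟩)]
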